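-- pv_equiv track=rewrite | github.com/abelrguezr/hacktricks-skills | skills/generic-methodologies-and-resources/phishing-methodology/homograph-attacks/scripts/check_domain.py | generate_homoglyph_variants
-- ===== SOURCE A (Python) =====
-- HOMOGlyph_MAP = {
--     'A': ['Α', 'А', 'А'],  # Greek Alpha, Cyrillic A
--     'B': ['В', 'Β'],       # Cyrillic Ve, Greek Beta
--     'C': ['С'],            # Cyrillic Es
--     'E': ['Е', 'Ε'],       # Cyrillic Ye, Greek Epsilon
--     'H': ['Η'],            # Greek Eta
--     'K': ['К'],            # Cyrillic Ka
--     'M': ['М'],            # Cyrillic Em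
--     'N': ['Н'],            # Cyrillic En
--     'O': ['О', 'Ο', 'օ'],  # Cyrillic O, Greek Omicron, Armenian O
--     'P': ['Р', 'Ρ'],       # Cyrillic Er, Greek Rho
--     'C': ['С'],            # Cyrillic Es
--     'T': ['Т', 'Ꭲ'],       # Cyrillic Te, Cherokee T
--     'X': ['Х'],            # Cyrillic Ha
--     'Y': ['У', 'Υ'],       # Cyrillic U, Greek Upsilon
--     'a': ['а', 'α'],       # Cyrillic a, Greek alpha
--     'b': ['в', 'β'],       # Cyrillic v, Greek beta
--     'c': ['с'],            # Cyrillic es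
--     'e': ['е', 'ε'],       # Cyrillic ye, Greek epsilon
--     'h': ['η'],            # Greek eta
--     'k': ['к'],            # Cyrillic ka
--     'm': ['м'],            # Cyrillic em
--     'n': ['н'],            # Cyrillic en
--     'o': ['о', 'ο', 'օ'],  # Cyrillic o, Greek omicron, Armenian o
--     'p': ['р', 'ρ'],       # Cyrillic er, Greek rho
--     'r': ['ɹ', 'ɾ'],       # Latin small capital r, Latin small letter r
--     's': ['ѕ', 'ѕ'],       # Cyrillic dze
--     't': ['т', 'Ꭲ'],       # Cyrillic te, Cherokee t
--     'x': ['х'],            # Cyrillic ha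
--     'y': ['у', 'υ'],       # Cyrillic u, Greek upsilon
--     '0': ['0', '۰'],       # Arabic-Indic digit zero
--     '1': ['1', '۱'],       # Arabic-Indic digit one
--     '2': ['2', '۲'],       # Arabic-Indic digit two
--     '3': ['3', '۳'],       # Arabic-Indic digit three
--     '4': ['4', '۴'],       # Arabic-Indic digit four
--     '5': ['5', '۵'],       # Arabic-Indic digit five
--     '6': ['6', '۶'],       # Arabic-Indic digit six
--     '7': ['7', '۷'],       # Arabic-Indic digit seven
--     '8': ['8', '۸'],       # Arabic-Indic digit eight
--     '9': ['9', '۹'],       # Arabic-Indic digit nine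
-- }
--
-- def generate_homoglyph_variants(domain: str) -> list:
--     """Generate visually-similar domain variants."""
--     variants = []
--
--     # Split domain into parts
--     parts = domain.split('.')
--
--     # Generate variants for each character in each part
--     for part_idx, part in enumerate(parts):
--         for char_idx, char in enumerate(part):
--             if char in HOMOGlyph_MAP:
--                 for lookalike in HOMOGlyph_MAP[char]:
--                     if lookalike != char:  # Skip if same character
--                         new_part = part[:char_idx] + lookalike + part[char_idx+1:]
--                         new_domain = '.'.join(parts[:part_idx] + [new_part] + parts[part_idx+1:])
--                         variants.append({
--                             "domain": new_domain,
--                             "substitution": f"{char} -> {lookalike}",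
--                             "position": f"part {part_idx+1}, char {char_idx+1}"
--                         })
--
--     return variants
-- ===== SOURCE B (Python) =====
-- HOMOGlyph_MAP = {
--     'A': ['Α', 'А', 'А'],
--     'B': ['В', 'Β'],
--     'C': ['С'],
--     'E': ['Е', 'Ε'],
--     'H': ['Η'],
--     'K': ['К'],
--     'M': ['М'],
--     'N': ['Н'],
--     'O': ['О', 'Ο', 'օ'],
--     'P': ['Р', 'Ρ'],
--     'C': ['С'],
--     'T': ['Т', 'Ꭲ'],
--     'X': ['Х'],
--     'Y': ['У', 'Υ'],
--     'a': ['а', 'α'],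
--     'b': ['в', 'β'],
--     'c': ['с'],
--     'e': ['е', 'ε'],
--     'h': ['η'],
--     'k': ['к'],
--     'm': ['м'],
--     'n': ['н'],
--     'o': ['о', 'ο', 'օ'],
--     'p': ['р', 'ρ'],
--     'r': ['ɹ', 'ɾ'],
--     's': ['ѕ', 'ѕ'],
--     't': ['т', 'Ꭲ'],
--     'x': ['х'],
--     'y': ['у', 'υ'],
--     '0': ['0', '۰'],
--     '1': ['1', '۱'],
--     '2': ['2', '۲'],
--     '3': ['3', '۳'],
--     '4': ['4', '۴'],
--     '5': ['5', '۵'],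
--     '6': ['6', '۶'],
--     '7': ['7', '۷'],
--     '8': ['8', '۸'],
--     '9': ['9', '۹'],
-- }
--
--
-- def generate_homoglyph_variants(domain: str) -> list:
--     """Generate visually-similar domain variants (single pass over the whole string)."""
--     variants = []
--     part_idx = 0
--     char_idx = 0
--     for i, char in enumerate(domain):
--         if char == '.':
--             part_idx += 1
--             char_idx = 0
--             continue
--         for lookalike in HOMOGlyph_MAP.get(char, ()):
--             if lookalike != char:
--                 variants.append({
--                     "domain": domain[:i] + lookalike + domain[i + 1:],
--                     "substitution": f"{char} -> {lookalike}",
--                     "position": f"part {part_idx + 1}, char {char_idx + 1}",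
--                 })
--         char_idx += 1
--     return variants
-- ===== Notes on version B (the rewrite author's own statement) =====
-- stated objective: simpler
-- what changed: Replaces split-into-parts plus per-variant list surgery and separator re-join with one pass over the whole string by global index, splicing domain[:i]+lookalike+domain[i+1:] directly and tracking part/char counters across separator dots.
import Mathlib
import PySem

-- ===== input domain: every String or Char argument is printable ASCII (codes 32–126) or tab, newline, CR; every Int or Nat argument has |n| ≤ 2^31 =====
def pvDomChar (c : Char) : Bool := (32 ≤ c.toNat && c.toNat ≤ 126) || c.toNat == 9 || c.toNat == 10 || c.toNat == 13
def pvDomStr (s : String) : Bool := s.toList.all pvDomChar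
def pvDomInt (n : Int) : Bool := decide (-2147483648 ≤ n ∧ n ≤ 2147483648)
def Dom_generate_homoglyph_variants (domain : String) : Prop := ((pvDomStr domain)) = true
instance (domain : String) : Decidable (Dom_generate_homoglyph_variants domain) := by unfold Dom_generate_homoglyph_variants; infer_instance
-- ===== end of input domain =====

-- B replaces A's split-into-parts / per-variant list surgery / separator re-join by a single pass over the
-- whole string with a global index (splicing domain[:i] + lookalike + domain[i+1:]) and running
-- part/char counters; objective: simpler (same results, proved below; no speed claim).

-- shared module constant (the Python dict literal; its duplicate key 'C' re-assigns the same
-- value in place, so the dict's items carry a single 'C' entry, as here)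
def HOMOGlyph_MAP : PySem.Dict Char (List Char) := ⟨[
  ('A', ['Α', 'А', 'А']),
  ('B', ['В', 'Β']),
  ('C', ['С']),
  ('E', ['Е', 'Ε']),
  ('H', ['Η']),
  ('K', ['К']),
  ('M', ['М']),
  ('N', ['Н']),
  ('O', ['О', 'Ο', 'օ']),
  ('P', ['Р', 'Ρ']),
  ('T', ['Т', 'Ꭲ']),
  ('X', ['Х']),
  ('Y', ['У', 'Υ']),
  ('a', ['а', 'α']),
  ('b', ['в', 'β']),
  ('c', ['с']),
  ('e', ['е', 'ε']),
  ('h', ['η']),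
  ('k', ['к']),
  ('m', ['м']),
  ('n', ['н']),
  ('o', ['о', 'ο', 'օ']),
  ('p', ['р', 'ρ']),
  ('r', ['ɹ', 'ɾ']),
  ('s', ['ѕ', 'ѕ']),
  ('t', ['т', 'Ꭲ']),
  ('x', ['х']),
  ('y', ['у', 'υ']),
  ('0', ['0', '۰']),
  ('1', ['1', '۱']),
  ('2', ['2', '۲']),
  ('3', ['3', '۳']),
  ('4', ['4', '۴']),
  ('5', ['5', '۵']),
  ('6', ['6', '۶']),
  ('7', ['7', '۷']),
  ('8', ['8', '۸']),
  ('9', ['9', '۹'])]⟩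

-- ===== PORT A =====
-- literal port of A: split on the dot separator, nested loops over enumerate(parts)/enumerate(part),
-- per variant rebuild the part by slices and re-join the patched parts list
def generate_homoglyph_variants (domain : String) : List (List (String × String)) :=
  let parts := PySem.Chars.splitOn domain.toList ['.']
  (PySem.List.enumerate parts 0).foldl (fun variants pe =>
    (PySem.List.enumerate pe.2 0).foldl (fun variants ce =>
      match HOMOGlyph_MAP.get? ce.2 with   -- 'char in HOMOGlyph_MAP' + HOMOGlyph_MAP[char]
      | none => variants
      | some lookalikes =>
        lookalikes.foldl (fun variants l =>
          if l != ce.2 then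
            let new_part := PySem.List.slice pe.2 none (some ce.1) ++ [l] ++
                            PySem.List.slice pe.2 (some (ce.1 + 1)) none
            let new_domain := PySem.Chars.join ['.']
              (PySem.List.slice parts none (some pe.1) ++ [new_part] ++
               PySem.List.slice parts (some (pe.1 + 1)) none)
            variants ++ [[("domain", String.ofList new_domain),
                          ("substitution", String.ofList ([ce.2] ++ " -> ".toList ++ [l])),
                          ("position", String.ofList ("part ".toList ++ (PySem.Int.toStr (pe.1 + 1)).toList ++
                                                      ", char ".toList ++ (PySem.Int.toStr (ce.1 + 1)).toList))]]
          else variants) variants) variants) []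

-- ===== PORT B =====
-- literal port of B: one pass over enumerate(domain) with state (variants, part_idx, char_idx),
-- splicing the whole string at the global index
def generate_homoglyph_variants_alt (domain : String) : List (List (String × String)) :=
  ((PySem.List.enumerate domain.toList 0).foldl (fun st ie =>
      if ie.2 = '.' then (st.1, st.2.1 + 1, 0)
      else
        ((HOMOGlyph_MAP.getD ie.2 []).foldl (fun variants l =>
            if l != ie.2 then
              variants ++ [[("domain", String.ofList (PySem.List.slice domain.toList none (some ie.1) ++ [l] ++
                                                      PySem.List.slice domain.toList (some (ie.1 + 1)) none)),
                            ("substitution", String.ofList ([ie.2] ++ " -> ".toList ++ [l])),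
                            ("position", String.ofList ("part ".toList ++ (PySem.Int.toStr (st.2.1 + 1)).toList ++
                                                        ", char ".toList ++ (PySem.Int.toStr (st.2.2 + 1)).toList))]]
            else variants) st.1,
         st.2.1, st.2.2 + 1))
    (([] : List (List (String × String))), (0 : Int), (0 : Int))).1

-- ===== PRECONDITION & SPEC =====
def Spec_generate_homoglyph_variants (domain : String) (out : List (List (String × String))) : Prop := out = generate_homoglyph_variants_alt domain
instance (domain : String) (out : List (List (String × String))) : Decidable (Spec_generate_homoglyph_variants domain out) := by unfold Spec_generate_homoglyph_variants; infer_instance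

-- ===== CLAIM (what is proved, stated in full; the proofs are below) =====
def Claim_equal_generate_homoglyph_variants : Prop := ∀ (domain : String), Dom_generate_homoglyph_variants domain → Spec_generate_homoglyph_variants domain (generate_homoglyph_variants domain)

-- ===== LEMMAS AND PROOFS =====

-- one variant entry: the patched domain split as dl ++ [l] ++ dr
def ent (dl dr : List Char) (p k : Int) (ch l : Char) : List (String × String) :=
  [("domain", String.ofList (dl ++ [l] ++ dr)),
   ("substitution", String.ofList ([ch] ++ " -> ".toList ++ [l])),
   ("position", String.ofList ("part ".toList ++ (PySem.Int.toStr (p + 1)).toList ++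
                               ", char ".toList ++ (PySem.Int.toStr (k + 1)).toList))]

-- all entries the innermost lookalike loop emits for one character
def emitD (dl dr : List Char) (p k : Int) (ch : Char) : List (List (String × String)) :=
  ((HOMOGlyph_MAP.getD ch []).filter (fun l => l != ch)).map (fun l => ent dl dr p k ch l)

-- structural version of splitting on the dot separator
def mySplit : List Char → List (List Char)
  | [] => [[]]
  | c :: r =>
    if c = '.' then [] :: mySplit r
    else
      match mySplit r with
      | p :: ps => (c :: p) :: ps
      | [] => [[c]]

-- the joined suffix as B sees it: empty, or a dot followed by the join of the remaining parts
def sufJoin : List (List Char) → List Char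
  | [] => []
  | s :: ss => '.' :: PySem.Chars.join ['.'] (s :: ss)

-- A's per-part character scan, in spliced form (dl grows, dsuf fixed)
def AchF (p : Int) : List Char → List Char → Int → List Char → List (List (String × String))
  | _, [], _, _ => []
  | dl, c :: rem, k, dsuf => emitD dl (rem ++ dsuf) p k c ++ AchF p (dl ++ [c]) rem (k + 1) dsuf

-- B's scan of the remaining characters (i = global index, p/k the counters)
def BcoreF (full : List Char) : List Char → Nat → Int → Int → List (List (String × String))
  | [], _, _, _ => []
  | c :: r, i, p, k =>
    if c = '.' then BcoreF full r (i + 1) (p + 1) 0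
    else emitD (full.take i) (full.drop (i + 1)) p k c ++ BcoreF full r (i + 1) p (k + 1)

-- A's outer loop over the remaining parts, pre = parts already passed
def AoutF : List (List Char) → List (List Char) → List (List (String × String))
  | _, [] => []
  | pre, part :: suf =>
    AchF (pre.length : Int) ((pre.map (· ++ ['.'])).flatten) part 0 (sufJoin suf) ++
    AoutF (pre ++ [part]) suf

lemma mySplit_ne_nil (cs : List Char) : mySplit cs ≠ [] := by
  induction cs with
  | nil => simp [mySplit]
  | cons c r ih =>
    simp only [mySplit]
    split_ifs
    · simp
    · rcases hms : mySplit r with _ | ⟨p, ps⟩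
      · exact absurd hms ih
      · simp

lemma splitOn_go_eq (l : List Char) : ∀ (fuel : Nat), l.length + 1 ≤ fuel →
    ∀ (cur : List Char) (acc : List (List Char)),
    PySem.Chars.splitOn.go ['.'] fuel l cur acc =
      acc.reverse ++ (match mySplit l with
                      | p :: ps => (cur.reverse ++ p) :: ps
                      | [] => []) := by
  induction l with
  | nil =>
    intro fuel hf cur acc
    cases fuel with
    | zero => omega
    | succ f => rw [PySem.Chars.splitOn.go] <;> simp [mySplit]
  | cons c rest ih =>
    intro fuel hf cur acc
    cases fuel with
    | zero => simp at hf
    | succ f =>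
      rw [PySem.Chars.splitOn.go]
      by_cases hc : c = '.'
      · simp only [List.isPrefixOf, hc, BEq.rfl, Bool.true_and, if_pos,
          List.length_singleton, List.drop_one, List.tail_cons]
        rw [ih f (by simp at hf ⊢; omega)]
        rcases hms : mySplit rest with _ | ⟨p, ps⟩
        · exact absurd hms (mySplit_ne_nil rest)
        · simp [mySplit, hms]
      · have hpre : ['.'].isPrefixOf (c :: rest) = false := by
          simp [List.isPrefixOf]; exact fun h => absurd h.symm hc
        rw [if_neg (by simp [hpre])]
        rw [ih f (by simp at hf ⊢; omega)]
        rcases hms : mySplit rest with _ | ⟨p, ps⟩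
        · exact absurd hms (mySplit_ne_nil rest)
        · simp [mySplit, hms, hc]

lemma splitOn_eq (cs : List Char) : PySem.Chars.splitOn cs ['.'] = mySplit cs := by
  show PySem.Chars.splitOn.go ['.'] (cs.length + 1) cs [] [] = mySplit cs
  rw [splitOn_go_eq cs (cs.length + 1) (le_refl _)]
  rcases hms : mySplit cs with _ | ⟨p, ps⟩
  · exact absurd hms (mySplit_ne_nil cs)
  · simp

lemma join_cons_ne (x : List Char) (s : List (List Char)) (h : s ≠ []) :
    PySem.Chars.join ['.'] (x :: s) = x ++ '.' :: PySem.Chars.join ['.'] s := by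
  rcases s with _ | ⟨a, as⟩
  · exact absurd rfl h
  · rw [PySem.Chars.join_cons_cons]; simp

lemma join_eq_sufJoin (x : List Char) (s : List (List Char)) :
    PySem.Chars.join ['.'] (x :: s) = x ++ sufJoin s := by
  rcases s with _ | ⟨a, as⟩
  · simp [PySem.Chars.join_singleton, sufJoin]
  · rw [join_cons_ne x (a :: as) (by simp)]; rfl

lemma join_mySplit (cs : List Char) : PySem.Chars.join ['.'] (mySplit cs) = cs := by
  induction cs with
  | nil => simp [mySplit, PySem.Chars.join_singleton]
  | cons c r ih =>
    simp only [mySplit]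
    rcases hms : mySplit r with _ | ⟨p, ps⟩
    · exact absurd hms (mySplit_ne_nil r)
    · have hr : PySem.Chars.join ['.'] (p :: ps) = r := by rw [← hms]; exact ih
      by_cases hc : c = '.'
      · rw [if_pos hc, join_eq_sufJoin]
        simp only [sufJoin, List.nil_append, hr, hc]
      · rw [if_neg hc, join_eq_sufJoin]
        rw [join_eq_sufJoin] at hr
        simp [← hr]

lemma nodot_mySplit (cs : List Char) : ∀ part ∈ mySplit cs, ∀ c ∈ part, c ≠ '.' := by
  induction cs with
  | nil => simp [mySplit]
  | cons c r ih =>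
    simp only [mySplit]
    by_cases hc : c = '.'
    · rw [if_pos hc]
      intro part hp x hx
      rcases List.mem_cons.mp hp with h | h
      · subst h; simp at hx
      · exact ih part h x hx
    · rw [if_neg hc]
      rcases hms : mySplit r with _ | ⟨p, ps⟩
      · exact absurd hms (mySplit_ne_nil r)
      · intro part hp x hx
        rcases List.mem_cons.mp hp with h | h
        · subst h
          rcases List.mem_cons.mp hx with h' | h'
          · subst h'; exact hc
          · exact ih p (by rw [hms]; simp) x h'
        · exact ih part (by rw [hms]; simp [h]) x hx

lemma join3 (pre : List (List Char)) (x : List Char) (suf : List (List Char)) :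
    PySem.Chars.join ['.'] (pre ++ x :: suf) =
      (pre.map (· ++ ['.'])).flatten ++ (x ++ sufJoin suf) := by
  induction pre with
  | nil => simpa using join_eq_sufJoin x suf
  | cons a pre' ih =>
    rw [List.cons_append, join_cons_ne a (pre' ++ x :: suf) (by simp), ih]
    simp

-- B's fold equals BcoreF
lemma B_fold (full : List Char) (r : List Char) : ∀ (i : Nat) (p k : Int)
    (acc : List (List (String × String))),
    ((PySem.List.enumerate r (i : Int)).foldl (fun st ie =>
      if ie.2 = '.' then (st.1, st.2.1 + 1, 0)
      else
        ((HOMOGlyph_MAP.getD ie.2 []).foldl (fun variants l =>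
            if l != ie.2 then
              variants ++ [[("domain", String.ofList (PySem.List.slice full none (some ie.1) ++ [l] ++
                                                      PySem.List.slice full (some (ie.1 + 1)) none)),
                            ("substitution", String.ofList ([ie.2] ++ " -> ".toList ++ [l])),
                            ("position", String.ofList ("part ".toList ++ (PySem.Int.toStr (st.2.1 + 1)).toList ++
                                                        ", char ".toList ++ (PySem.Int.toStr (st.2.2 + 1)).toList))]]
            else variants) st.1,
         st.2.1, st.2.2 + 1)) (acc, p, k)).1 = acc ++ BcoreF full r i p k := by
  induction r with
  | nil => intro i p k acc; simp [PySem.List.enumerate_nil, BcoreF]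
  | cons c r' ih =>
    intro i p k acc
    rw [PySem.List.enumerate_cons, List.foldl_cons]
    dsimp only
    rw [show ((i : Int) + 1) = ((i + 1 : Nat) : Int) by push_cast; ring]
    by_cases hc : c = '.'
    · rw [if_pos hc, ih (i + 1) (p + 1) 0 acc, BcoreF, if_pos hc]
    · rw [if_neg hc,
        PySem.List.slice_to_natCast full i, PySem.List.slice_from_natCast full (i + 1),
        PySem.List.foldl_append_if (fun l => l != c), ih (i + 1) p (k + 1) _, BcoreF, if_neg hc]
      simp [emitD, ent]

-- A's inner character fold equals AchF
lemma A_fold_chars (parts pre suf : List (List Char)) (rem : List Char) :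
    ∀ (done : List Char), parts = pre ++ (done ++ rem) :: suf →
    ∀ (acc : List (List (String × String))),
    ((PySem.List.enumerate rem (done.length : Int)).foldl (fun variants ce =>
      match HOMOGlyph_MAP.get? ce.2 with
      | none => variants
      | some lookalikes =>
        lookalikes.foldl (fun variants l =>
          if l != ce.2 then
            let new_part := PySem.List.slice (done ++ rem) none (some ce.1) ++ [l] ++
                            PySem.List.slice (done ++ rem) (some (ce.1 + 1)) none
            let new_domain := PySem.Chars.join ['.']
              (PySem.List.slice parts none (some ((pre.length : Int))) ++ [new_part] ++
               PySem.List.slice parts (some ((pre.length : Int) + 1)) none)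
            variants ++ [[("domain", String.ofList new_domain),
                          ("substitution", String.ofList ([ce.2] ++ " -> ".toList ++ [l])),
                          ("position", String.ofList ("part ".toList ++ (PySem.Int.toStr ((pre.length : Int) + 1)).toList ++
                                                      ", char ".toList ++ (PySem.Int.toStr (ce.1 + 1)).toList))]]
          else variants) variants) acc) =
    acc ++ AchF (pre.length : Int) ((pre.map (· ++ ['.'])).flatten ++ done) rem (done.length : Int) (sufJoin suf) := by
  induction rem with
  | nil => intro done _ acc; simp [PySem.List.enumerate_nil, AchF]
  | cons c rem' ih =>
    intro done hparts acc
    rw [PySem.List.enumerate_cons, List.foldl_cons]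
    dsimp only
    have hcast : ((done.length : Int) + 1) = ((done.length + 1 : Nat) : Int) := by push_cast; ring
    have htake : PySem.List.slice (done ++ c :: rem') none (some ((done.length : Nat) : Int)) = done := by
      rw [PySem.List.slice_to_natCast]; exact List.take_left
    have hdrop : PySem.List.slice (done ++ c :: rem') (some ((done.length : Int) + 1)) none = rem' := by
      rw [hcast, PySem.List.slice_from_natCast,
        show done ++ c :: rem' = (done ++ [c]) ++ rem' by simp,
        show done.length + 1 = (done ++ [c]).length by simp, List.drop_left]
    have htakeP : PySem.List.slice parts none (some ((pre.length : Nat) : Int)) = pre := by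
      rw [PySem.List.slice_to_natCast, hparts, List.take_left]
    have hdropP : PySem.List.slice parts (some ((pre.length : Int) + 1)) none = suf := by
      rw [show ((pre.length : Int) + 1) = ((pre.length + 1 : Nat) : Int) by push_cast; ring,
        PySem.List.slice_from_natCast, hparts,
        show pre ++ (done ++ c :: rem') :: suf = (pre ++ [done ++ c :: rem']) ++ suf by simp,
        show pre.length + 1 = (pre ++ [done ++ c :: rem']).length by simp, List.drop_left]
    have ihh := ih (done ++ [c]) (by rw [hparts]; simp)
    simp only [List.length_append, List.length_singleton, List.append_assoc,
      List.singleton_append] at ihh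
    simp only [Nat.cast_add, Nat.cast_one] at ihh
    rcases hget : HOMOGlyph_MAP.get? c with _ | ls
    · dsimp only
      simp only [htakeP, hdropP, List.append_assoc, List.singleton_append] at ihh ⊢
      rw [ihh, AchF]
      simp [emitD, PySem.Dict.getD, hget, List.append_assoc]
    · dsimp only
      rw [PySem.List.foldl_append_if (fun l => l != c)]
      simp only [htake, hdrop, htakeP, hdropP, List.append_assoc,
        List.singleton_append] at ihh ⊢
      rw [ihh, AchF]
      simp [emitD, ent, PySem.Dict.getD, hget, join3, List.append_assoc]

-- A's outer fold equals AoutF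
lemma A_fold_outer (parts : List (List Char)) : ∀ (suf pre : List (List Char)),
    parts = pre ++ suf → ∀ (acc : List (List (String × String))),
    ((PySem.List.enumerate suf (pre.length : Int)).foldl (fun variants pe =>
      (PySem.List.enumerate pe.2 0).foldl (fun variants ce =>
        match HOMOGlyph_MAP.get? ce.2 with
        | none => variants
        | some lookalikes =>
          lookalikes.foldl (fun variants l =>
            if l != ce.2 then
              let new_part := PySem.List.slice pe.2 none (some ce.1) ++ [l] ++
                              PySem.List.slice pe.2 (some (ce.1 + 1)) none
              let new_domain := PySem.Chars.join ['.']
                (PySem.List.slice parts none (some pe.1) ++ [new_part] ++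
                 PySem.List.slice parts (some (pe.1 + 1)) none)
              variants ++ [[("domain", String.ofList new_domain),
                            ("substitution", String.ofList ([ce.2] ++ " -> ".toList ++ [l])),
                            ("position", String.ofList ("part ".toList ++ (PySem.Int.toStr (pe.1 + 1)).toList ++
                                                        ", char ".toList ++ (PySem.Int.toStr (ce.1 + 1)).toList))]]
            else variants) variants) variants) acc) = acc ++ AoutF pre suf := by
  intro suf
  induction suf with
  | nil => intro pre _ acc; simp [PySem.List.enumerate_nil, AoutF]
  | cons part suf' ih =>
    intro pre hparts acc
    rw [PySem.List.enumerate_cons, List.foldl_cons]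
    dsimp only
    have hch := A_fold_chars parts pre suf' part [] (by simpa using hparts)
    simp only [List.nil_append, List.length_nil, Nat.cast_zero, List.append_nil] at hch
    rw [hch acc]
    have ihh := ih (pre ++ [part]) (by rw [hparts]; simp)
    simp only [List.length_append, List.length_singleton] at ihh
    simp only [Nat.cast_add, Nat.cast_one] at ihh
    rw [ihh]
    rw [AoutF]
    simp [List.append_assoc]

-- one dot-free chunk of B's scan equals A's character scan of that part
lemma chunk (full : List Char) (rem : List Char) : ∀ (dl tail : List Char) (p k : Int),
    (∀ c ∈ rem, c ≠ '.') → full = dl ++ rem ++ tail →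
    BcoreF full (rem ++ tail) dl.length p k =
      AchF p dl rem k tail ++ BcoreF full tail (dl.length + rem.length) p (k + rem.length) := by
  induction rem with
  | nil => intro dl tail p k _ _; simp [AchF]
  | cons c rem' ih =>
    intro dl tail p k hnd hfull
    have hc : c ≠ '.' := hnd c (by simp)
    have htake : full.take dl.length = dl := by
      rw [hfull, List.append_assoc, List.take_left]
    have hdrop : full.drop (dl.length + 1) = rem' ++ tail := by
      have : full = (dl ++ [c]) ++ (rem' ++ tail) := by simp [hfull]
      rw [this, show dl.length + 1 = (dl ++ [c]).length by simp, List.drop_left]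
    have hfull' : full = (dl ++ [c]) ++ rem' ++ tail := by simp [hfull]
    have ihc := ih (dl ++ [c]) tail p (k + 1) (fun x hx => hnd x (by simp [hx])) hfull'
    simp only [List.length_append, List.length_singleton] at ihc
    rw [List.cons_append, BcoreF, if_neg hc, htake, hdrop, ihc, AchF]
    have h1 : dl.length + (c :: rem').length = dl.length + 1 + rem'.length := by simp; omega
    have h2 : k + ((c :: rem').length : Int) = k + 1 + (rem'.length : Int) := by
      push_cast [List.length_cons]; ring
    rw [h1, h2]
    simp

-- B's scan of the joined suffix equals A's outer loop
lemma top (full : List Char) : ∀ (suf pre : List (List Char)),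
    (∀ part ∈ suf, ∀ c ∈ part, c ≠ '.') →
    full = ((pre.map (· ++ ['.'])).flatten) ++ PySem.Chars.join ['.'] suf →
    BcoreF full (PySem.Chars.join ['.'] suf) ((pre.map (· ++ ['.'])).flatten).length (pre.length : Int) 0 =
      AoutF pre suf := by
  intro suf
  induction suf with
  | nil => intro pre _ _; simp [PySem.Chars.join_nil, BcoreF, AoutF]
  | cons part suf' ih =>
    intro pre hnd hfull
    rw [join_eq_sufJoin part suf']
    have hfull2 : full = ((pre.map (· ++ ['.'])).flatten) ++ part ++ sufJoin suf' := by
      rw [hfull, join_eq_sufJoin part suf']; simp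
    have hch := chunk full part ((pre.map (· ++ ['.'])).flatten) (sufJoin suf') (pre.length : Int) 0
      (hnd part (by simp)) (by simpa using hfull2)
    rw [hch, AoutF]
    congr 1
    rcases suf' with _ | ⟨q, qs⟩
    · simp [sufJoin, BcoreF, AoutF]
    · have hstep : BcoreF full (sufJoin (q :: qs))
          (((pre.map (· ++ ['.'])).flatten).length + part.length) (pre.length : Int) (0 + (part.length : Int)) =
          BcoreF full (PySem.Chars.join ['.'] (q :: qs))
          (((pre.map (· ++ ['.'])).flatten).length + part.length + 1) ((pre.length : Int) + 1) 0 := by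
        rw [sufJoin, BcoreF, if_pos rfl]
      rw [hstep]
      have hpre' : (((pre ++ [part]).map (· ++ ['.'])).flatten) =
          ((pre.map (· ++ ['.'])).flatten) ++ part ++ ['.'] := by simp
      have ihh := ih (pre ++ [part]) (fun x hx => hnd x (by simp [hx]))
        (by rw [hpre']; rw [hfull2, sufJoin]; simp)
      rw [hpre'] at ihh
      simp only [List.length_append, List.length_singleton] at ihh
      push_cast at ihh
      exact ihh

-- ===== VERDICT (by name: the statement is the Claim_ definition above) =====
theorem generate_homoglyph_variants_spec : Claim_equal_generate_homoglyph_variants := by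
  intro domain _
  show generate_homoglyph_variants domain = generate_homoglyph_variants_alt domain
  have hb := B_fold domain.toList domain.toList 0 0 0 []
  simp only [Nat.cast_zero, List.nil_append] at hb
  have ha := A_fold_outer (mySplit domain.toList) (mySplit domain.toList) [] (by simp) []
  simp only [List.length_nil, Nat.cast_zero, List.nil_append] at ha
  have ht := top domain.toList (mySplit domain.toList) [] (nodot_mySplit domain.toList)
    (by simp [join_mySplit])
  simp only [List.map_nil, List.flatten_nil, List.length_nil, Nat.cast_zero,
    join_mySplit] at ht
  rw [generate_homoglyph_variants, generate_homoglyph_variants_alt]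
  rw [splitOn_eq, ha, hb, ht]
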